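-- pv_equiv track=rewrite | github.com/Zikun-Yang/VAMPIRE | src/vampire/stats_utils/ops_to_cigar.py | ops_to_cigar
-- ===== SOURCE A (Python) =====
-- from typing import List, Optional
--
-- def ops_to_cigar(ops: List[str], m: int) -> str:
--     """
--     Convert atomic ops to CIGAR string.
--     Inputs:
--         ops : List[str]
--             atomic operations: '=', 'X', 'I', 'D', '/'
--             - '=': match (seq and motif have same base)
--             - 'X': mismatch (seq and motif have different bases)
--             - 'I': insertion in seq (seq has extra base, motif has gap)
--             - 'D': deletion in seq (seq has gap, motif has extra base)
--             - '/': motif wrap separator (indicates end of one motif copy)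
--         m : int, length of the motif
--     Outputs:
--         cigar : str
--             CIGAR string
--     Rules:
--         '=', 'X', 'I', 'D' are counted independently
--         '/' is a standalone separator (motif wrap)
--     """
--     cigar: List[str] = []
--     last_op: Optional[str] = None
--     cur_pos: int = 0
--     count: int = 0
--
--     for op in ops:
--         if last_op is None:
--             last_op = op
--             cur_pos += 1
--             count = 1
--         elif op == last_op:
--             count += 1
--             if op != 'I':
--                 cur_pos += 1
--         else:
--             cigar.append(f"{count}{last_op}")
--             last_op = op
--             count = 1
--             if op != 'I':
--                 cur_pos += 1
--         # motif wrap
--         if cur_pos == m: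
--             cigar.append(f"{count}{last_op}/")
--             cur_pos = 0
--             last_op = None
--             count = 0
--     if last_op is not None:
--         cigar.append(f"{count}{last_op}")
--
--     return "".join(cigar)
-- ===== SOURCE B (Python) =====
-- def ops_to_cigar(ops, m):
--     # First pass: split ops into motif-copy segments (wrapped iff cut at pos == m).
--     segments = []
--     cur = None
--     pos = 0
--     for op in ops:
--         if cur is None:
--             cur = [op]
--             pos = 1
--         else:
--             cur.append(op)
--             if op != 'I':
--                 pos += 1
--         if pos == m:
--             segments.append((cur, True))
--             cur = None
--             pos = 0
--     if cur is not None: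
--         segments.append((cur, False))
--     # Second pass: run-length-encode each segment independently.
--     parts = []
--     for seg, wrapped in segments:
--         runs = []
--         for op in seg:
--             if runs and runs[-1][1] == op:
--                 runs[-1][0] += 1
--             else:
--                 runs.append([1, op])
--         for c, op in runs:
--             parts.append(f"{c}{op}")
--         if wrapped:
--             parts.append("/")
--     return "".join(parts)
-- ===== Notes on version B (the rewrite author's own statement) =====
-- stated objective: alternative
-- what changed: Replaces A's single fused loop (which interleaves run-length encoding with motif-wrap bookkeeping in shared last_op/count/cur_pos state) by a two-pass decomposition: a first pass that only splits ops into motif-copy segments, then an independent run-length encoding of each segment.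
import Mathlib
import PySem

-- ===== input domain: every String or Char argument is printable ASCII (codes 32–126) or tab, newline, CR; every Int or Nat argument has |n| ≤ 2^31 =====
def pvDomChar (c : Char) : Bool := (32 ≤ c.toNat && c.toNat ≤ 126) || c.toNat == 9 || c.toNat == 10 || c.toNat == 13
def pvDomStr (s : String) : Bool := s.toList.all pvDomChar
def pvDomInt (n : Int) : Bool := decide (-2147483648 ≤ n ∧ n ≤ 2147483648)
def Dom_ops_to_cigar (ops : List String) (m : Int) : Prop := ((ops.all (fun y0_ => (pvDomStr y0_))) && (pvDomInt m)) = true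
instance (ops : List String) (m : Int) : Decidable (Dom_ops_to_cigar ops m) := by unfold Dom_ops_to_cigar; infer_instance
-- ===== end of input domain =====

-- B replaces A's single fused RLE+wrap loop by a two-pass decomposition (segment, then
-- run-length-encode each segment); objective: alternative (same cost, clearer structure).

-- ===== PORT A =====
-- state: (cigar, last_op, cur_pos, count)
def aStep (m : Int) : List String × Option String × Int × Int → String → List String × Option String × Int × Int
  | (cigar, lastOp, curPos, count), op =>
    let (cigar1, l1, pos1, cnt1) : List String × String × Int × Int :=
      match lastOp with
      | none => (cigar, op, curPos + 1, 1)
      | some l =>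
        if op = l then
          (cigar, l, if op = "I" then curPos else curPos + 1, count + 1)
        else
          (cigar ++ [PySem.Int.toStr count ++ l], op, if op = "I" then curPos else curPos + 1, 1)
    if pos1 = m then (cigar1 ++ [PySem.Int.toStr cnt1 ++ l1 ++ "/"], none, 0, 0)
    else (cigar1, some l1, pos1, cnt1)

def ops_to_cigar (ops : List String) (m : Int) : String :=
  match ops.foldl (aStep m) ([], none, 0, 0) with
  | (cigar, lastOp, _, count) =>
    String.join (match lastOp with
      | some l => cigar ++ [PySem.Int.toStr count ++ l]
      | none => cigar)

-- ===== PORT B =====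
-- first pass state: (segments, cur, pos)
def bStep (m : Int) : List (List String × Bool) × Option (List String) × Int → String → List (List String × Bool) × Option (List String) × Int
  | (segs, cur, pos), op =>
    let (cur1, pos1) : List String × Int :=
      match cur with
      | none => ([op], 1)
      | some seg => (seg ++ [op], if op = "I" then pos else pos + 1)
    if pos1 = m then (segs ++ [(cur1, true)], none, 0)
    else (segs, some cur1, pos1)

-- the inner `runs` loop of B's second pass (runs[-1][0] += 1 modelled as dropLast ++ [...])
def addRun (runs : List (Int × String)) (op : String) : List (Int × String) :=
  match runs.getLast? with
  | some (c, x) => if x = op then runs.dropLast ++ [(c + 1, x)] else runs ++ [(1, op)]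
  | none => [(1, op)]

def segParts (seg : List String) (wrapped : Bool) : List String :=
  (seg.foldl addRun []).map (fun p => PySem.Int.toStr p.1 ++ p.2) ++ (if wrapped then ["/"] else [])

def ops_to_cigar_alt (ops : List String) (m : Int) : String :=
  match ops.foldl (bStep m) ([], none, 0) with
  | (segs, cur, _) =>
    let segs2 := match cur with
      | some seg => segs ++ [(seg, false)]
      | none => segs
    String.join (segs2.flatMap fun sw => segParts sw.1 sw.2)

-- ===== PRECONDITION & SPEC =====
def Spec_ops_to_cigar (ops : List String) (m : Int) (out : String) : Prop := out = ops_to_cigar_alt ops m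
instance (ops : List String) (m : Int) (out : String) : Decidable (Spec_ops_to_cigar ops m out) := by unfold Spec_ops_to_cigar; infer_instance

-- ===== CLAIM (what is proved, stated in full; the proofs are below) =====
def Claim_equal_ops_to_cigar : Prop := ∀ (ops : List String) (m : Int), Dom_ops_to_cigar ops m → Spec_ops_to_cigar ops m (ops_to_cigar ops m)

-- ===== LEMMAS AND PROOFS =====

def renderB (segs : List (List String × Bool)) : String :=
  String.join (segs.flatMap fun sw => segParts sw.1 sw.2)

def tokstr (R : List (Int × String)) : String :=
  String.join (R.map fun p => PySem.Int.toStr p.1 ++ p.2)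

-- invariant relating A's loop state to B's first-pass state
def StInv : List String × Option String × Int × Int → List (List String × Bool) × Option (List String) × Int → Prop
  | (cigar, none, curPos, _), (segs, none, pos) =>
      curPos = 0 ∧ pos = 0 ∧ String.join cigar = renderB segs
  | (cigar, some l, curPos, count), (segs, some seg, pos) =>
      curPos = pos ∧ ∃ R, seg.foldl addRun [] = R ++ [(count, l)] ∧
        String.join cigar = renderB segs ++ tokstr R
  | _, _ => False

theorem foldl_append_init (l : List String) (s : String) :
    List.foldl (fun r t => r ++ t) s l = s ++ List.foldl (fun r t => r ++ t) "" l := by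
  induction l generalizing s with
  | nil => simp
  | cons x xs ih =>
    simp only [List.foldl_cons]
    rw [ih (s ++ x), ih ("" ++ x), String.append_assoc]
    simp

theorem join_append (a b : List String) : String.join (a ++ b) = String.join a ++ String.join b := by
  simp only [String.join, List.foldl_append]
  rw [foldl_append_init b (List.foldl (fun r t => r ++ t) "" a)]

theorem join_singleton (s : String) : String.join [s] = s := by
  simp [String.join]

theorem addRun_concat (R : List (Int × String)) (c : Int) (l y : String) :
    addRun (R ++ [(c, l)]) y = if l = y then R ++ [(c + 1, l)] else R ++ [(c, l), (1, y)] := by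
  unfold addRun
  rw [List.getLast?_concat]
  split_ifs <;> simp_all

theorem addRun_nil (op : String) : addRun [] op = [(1, op)] := by
  simp [addRun]

theorem tokstr_concat (R : List (Int × String)) (c : Int) (l : String) :
    tokstr (R ++ [(c, l)]) = tokstr R ++ (PySem.Int.toStr c ++ l) := by
  unfold tokstr
  rw [List.map_append, join_append, List.map_singleton, join_singleton]

theorem renderB_concat (segs : List (List String × Bool)) (seg : List String) (w : Bool) :
    renderB (segs ++ [(seg, w)]) =
      renderB segs ++ tokstr (seg.foldl addRun []) ++ (if w then "/" else "") := by
  unfold renderB tokstr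
  rw [List.flatMap_append, join_append]
  simp only [List.flatMap_cons, List.flatMap_nil, List.append_nil, segParts]
  cases w <;> simp [join_append, join_singleton, String.append_assoc]

-- A's finalization equals B's finalization under the invariant
theorem fin_agree (cigar : List String) (lastOp : Option String) (curPos count : Int)
    (segs : List (List String × Bool)) (cur : Option (List String)) (pos : Int) :
    StInv (cigar, lastOp, curPos, count) (segs, cur, pos) →
    String.join (match lastOp with
      | some l => cigar ++ [PySem.Int.toStr count ++ l]
      | none => cigar) =
    renderB (match cur with
      | some seg => segs ++ [(seg, false)]
      | none => segs) := by
  intro h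
  match lastOp, cur with
  | none, none =>
    obtain ⟨_, _, h3⟩ := h
    simpa using h3
  | some l, some seg =>
    obtain ⟨-, R, hR, hj⟩ := h
    show String.join (cigar ++ [PySem.Int.toStr count ++ l]) = renderB (segs ++ [(seg, false)])
    rw [join_append, renderB_concat, hR, tokstr_concat, hj, join_singleton]
    simp [String.append_assoc]
  | none, some _ => exact h.elim
  | some _, none => exact h.elim

theorem step_preserves (m : Int) (op : String)
    (stA : List String × Option String × Int × Int)
    (stB : List (List String × Bool) × Option (List String) × Int)
    (h : StInv stA stB) : StInv (aStep m stA op) (bStep m stB op) := by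
  obtain ⟨cigar, lastOp, curPos, count⟩ := stA
  obtain ⟨segs, cur, pos⟩ := stB
  match lastOp, cur with
  | none, none =>
    obtain ⟨h1, h2, h3⟩ := h
    subst h1; subst h2
    simp only [aStep, bStep]
    by_cases hm : (0 : Int) + 1 = m
    · rw [if_pos hm, if_pos (by omega : (1 : Int) = m)]
      refine ⟨rfl, rfl, ?_⟩
      rw [join_append, renderB_concat, h3, join_singleton]
      simp only [List.foldl_cons, List.foldl_nil, addRun_nil]
      simp [tokstr, String.join, String.append_assoc]
    · rw [if_neg hm, if_neg (by omega : ¬ (1 : Int) = m)]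
      refine ⟨by omega, [], by simp [addRun_nil], ?_⟩
      rw [h3]
      simp [tokstr, String.join]
  | some l, some seg =>
    obtain ⟨h1, R, hR, hj⟩ := h
    subst h1
    by_cases hop : op = l
    · subst hop
      have hrle : (seg ++ [op]).foldl addRun [] = R ++ [(count + 1, op)] := by
        rw [List.foldl_append, hR, List.foldl_cons, List.foldl_nil, addRun_concat, if_pos rfl]
      have e1 : aStep m (cigar, some op, curPos, count) op =
          (if (if op = "I" then curPos else curPos + 1) = m
           then (cigar ++ [PySem.Int.toStr (count + 1) ++ op ++ "/"], none, 0, 0)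
           else (cigar, some op, (if op = "I" then curPos else curPos + 1), count + 1)) := by
        simp [aStep]
      have e2 : bStep m (segs, some seg, curPos) op =
          (if (if op = "I" then curPos else curPos + 1) = m
           then (segs ++ [(seg ++ [op], true)], none, 0)
           else (segs, some (seg ++ [op]), (if op = "I" then curPos else curPos + 1))) := by
        simp [bStep]
      rw [e1, e2]
      by_cases hm : (if op = "I" then curPos else curPos + 1) = m
      · rw [if_pos hm, if_pos hm]
        refine ⟨rfl, rfl, ?_⟩
        rw [join_append, renderB_concat, hrle, tokstr_concat, hj, join_singleton]
        simp [String.append_assoc]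
      · rw [if_neg hm, if_neg hm]
        exact ⟨rfl, R, hrle, hj⟩
    · have hlop : ¬ l = op := fun e => hop e.symm
      have hrle : (seg ++ [op]).foldl addRun [] = (R ++ [(count, l)]) ++ [(1, op)] := by
        rw [List.foldl_append, hR, List.foldl_cons, List.foldl_nil, addRun_concat, if_neg hlop]
        simp
      have e1 : aStep m (cigar, some l, curPos, count) op =
          (if (if op = "I" then curPos else curPos + 1) = m
           then (cigar ++ [PySem.Int.toStr count ++ l] ++ [PySem.Int.toStr 1 ++ op ++ "/"], none, 0, 0)
           else (cigar ++ [PySem.Int.toStr count ++ l], some op, (if op = "I" then curPos else curPos + 1), 1)) := by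
        simp [aStep, hop]
      have e2 : bStep m (segs, some seg, curPos) op =
          (if (if op = "I" then curPos else curPos + 1) = m
           then (segs ++ [(seg ++ [op], true)], none, 0)
           else (segs, some (seg ++ [op]), (if op = "I" then curPos else curPos + 1))) := by
        simp [bStep]
      rw [e1, e2]
      by_cases hm : (if op = "I" then curPos else curPos + 1) = m
      · rw [if_pos hm, if_pos hm]
        refine ⟨rfl, rfl, ?_⟩
        rw [join_append, join_append, renderB_concat, hrle, tokstr_concat, tokstr_concat,
          hj, join_singleton, join_singleton]
        simp [String.append_assoc]
      · rw [if_neg hm, if_neg hm]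
        refine ⟨rfl, R ++ [(count, l)], hrle, ?_⟩
        rw [join_append, hj, tokstr_concat, join_singleton]
        simp [String.append_assoc]
  | none, some _ => exact h.elim
  | some _, none => exact h.elim

theorem loop_agree (m : Int) (ops : List String)
    (stA : List String × Option String × Int × Int)
    (stB : List (List String × Bool) × Option (List String) × Int)
    (h : StInv stA stB) : StInv (ops.foldl (aStep m) stA) (ops.foldl (bStep m) stB) := by
  induction ops generalizing stA stB with
  | nil => exact h
  | cons x xs ih => exact ih _ _ (step_preserves m x _ _ h)

-- ===== VERDICT (by name: the statement is the Claim_ definition above) =====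
theorem ops_to_cigar_spec : Claim_equal_ops_to_cigar := by
  intro ops m _
  unfold Spec_ops_to_cigar ops_to_cigar ops_to_cigar_alt
  have h := loop_agree m ops ([], none, 0, 0) ([], none, 0) ⟨rfl, rfl, rfl⟩
  rcases hA : List.foldl (aStep m) ([], none, 0, 0) ops with ⟨cigar, lastOp, curPos, count⟩
  rcases hB : List.foldl (bStep m) ([], none, 0) ops with ⟨segs, cur, pos⟩
  rw [hA, hB] at h
  simpa [renderB] using fin_agree cigar lastOp curPos count segs cur pos h
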